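-- pv_equiv track=rewrite | github.com/Julesc013/dominium | astro/views/orbit_view_engine.py | _rows_by_object_id
-- ===== SOURCE A (Python) =====
-- from typing import Dict, List, Mapping, Sequence
--
-- def _rows_by_object_id(rows: object) -> Dict[str, dict]:
--     out: Dict[str, dict] = {}
--     for row in list(rows or []):
--         if not isinstance(row, Mapping):
--             continue
--         token = str(dict(row).get("object_id", "")).strip()
--         if token:
--             out[token] = dict(row)
--     return dict((key, dict(out[key])) for key in sorted(out.keys()))
-- ===== SOURCE B (Python) =====
-- from typing import Dict, Mapping
--
--
-- def _rows_by_object_id(rows: object) -> Dict[str, dict]: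
--     # Maintain a token-sorted association list incrementally (insert-or-replace in
--     # sorted position), so no dict-keyed staging pass and no final sort are needed.
--     result = []  # (token, row) pairs, strictly sorted by token
--     for row in list(rows or []):
--         if not isinstance(row, Mapping):
--             continue
--         token = str(dict(row).get("object_id", "")).strip()
--         if not token:
--             continue
--         value = dict(row)
--         i = 0
--         while i < len(result) and result[i][0] < token:
--             i += 1
--         if i < len(result) and result[i][0] == token:
--             result[i] = (token, value)
--         else:
--             result.insert(i, (token, value))
--     return dict(result)
-- ===== Notes on version B (the rewrite author's own statement) =====
-- stated objective: alternative
-- what changed: B never builds A's token-keyed staging dict and never calls a sort: it maintains one token-sorted association list incrementally, doing a linear insert-or-replace for each valid row, and the sorted list is the result.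
import Mathlib
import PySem

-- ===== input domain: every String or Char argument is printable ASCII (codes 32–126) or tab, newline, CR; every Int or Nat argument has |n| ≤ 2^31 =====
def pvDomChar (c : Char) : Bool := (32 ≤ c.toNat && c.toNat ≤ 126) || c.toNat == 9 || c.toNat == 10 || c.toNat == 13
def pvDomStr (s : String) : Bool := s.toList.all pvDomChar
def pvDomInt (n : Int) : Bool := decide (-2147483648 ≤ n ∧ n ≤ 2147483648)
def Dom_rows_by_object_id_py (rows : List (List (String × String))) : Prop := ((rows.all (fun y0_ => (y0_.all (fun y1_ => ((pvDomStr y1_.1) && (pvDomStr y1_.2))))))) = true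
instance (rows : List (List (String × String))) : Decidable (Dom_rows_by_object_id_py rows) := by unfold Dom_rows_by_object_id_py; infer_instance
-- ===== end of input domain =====

-- B maintains a token-sorted association list incrementally (linear insert-or-replace per
-- row) and never builds A's staging dict nor calls a sort (alternative decomposition, same cost).


-- ===== PORT A =====
-- 'for row in list(rows or [])' is a plain pass over rows; every row is a Mapping under the
-- type convention, so the isinstance guard never skips.  'dict(row)' is PySem.Dict.ofList row
-- (exact: first-occurrence key position, last value, like Python's dict over pairs);
-- 'dict(out[key])' copies a dict value unchanged, so it is the value itself; out[key] cannot
-- raise (key comes from out.keys()), ported as getD with an arbitrary default.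
def rows_by_object_id_py (rows : List (List (String × String))) : List (String × List (String × String)) :=
  let out : PySem.Dict String (List (String × String)) :=
    rows.foldl (fun out row =>
      let token := PySem.Str.strip (PySem.Dict.getD (PySem.Dict.ofList row) "object_id" "")
      if token ≠ "" then out.insert token (PySem.Dict.ofList row).items else out)
      PySem.Dict.empty
  ((PySem.List.sorted out.keys (fun k => k) false).foldl
      (fun d k => d.insert k (out.getD k [])) PySem.Dict.empty).items

-- ===== PORT B =====
-- Source B's inner loop 'scan i forward while result[i][0] < token; replace on equal token,
-- else insert at position i', written as the obvious structural recursion on the list.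
def pvInsUpd (k : String) (v : List (String × String)) :
    List (String × List (String × String)) → List (String × List (String × String))
  | [] => [(k, v)]
  | p :: rest =>
      if p.1 < k then p :: pvInsUpd k v rest
      else if p.1 = k then (k, v) :: rest
      else (k, v) :: p :: rest

def rows_by_object_id_py_alt (rows : List (List (String × String))) : List (String × List (String × String)) :=
  let result : List (String × List (String × String)) :=
    rows.foldl (fun res row =>
      let token := PySem.Str.strip (PySem.Dict.getD (PySem.Dict.ofList row) "object_id" "")
      if token ≠ "" then pvInsUpd token (PySem.Dict.ofList row).items res else res) []
  (PySem.Dict.ofList result).items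

-- ===== PRECONDITION & SPEC =====
def Spec_rows_by_object_id_py (rows : List (List (String × String))) (out : List (String × List (String × String))) : Prop := out = rows_by_object_id_py_alt rows
instance (rows : List (List (String × String))) (out : List (String × List (String × String))) : Decidable (Spec_rows_by_object_id_py rows out) := by unfold Spec_rows_by_object_id_py; infer_instance

-- ===== CLAIM (what is proved, stated in full; the proofs are below) =====
def Claim_equal_rows_by_object_id_py : Prop := ∀ (rows : List (List (String × String))), Dom_rows_by_object_id_py rows → Spec_rows_by_object_id_py rows (rows_by_object_id_py rows)

-- ===== LEMMAS AND PROOFS =====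

-- the token computed from a row, and the stored dict(row)
def pvTok (row : List (String × String)) : String :=
  PySem.Str.strip (PySem.Dict.getD (PySem.Dict.ofList row) "object_id" "")

def pvItems (row : List (String × String)) : List (String × String) :=
  (PySem.Dict.ofList row).items

-- the valid (token, dict(row)) entries, in input order
def pvEntries (rows : List (List (String × String))) : List (String × List (String × String)) :=
  rows.filterMap (fun row => if pvTok row ≠ "" then some (pvTok row, pvItems row) else none)

-- A's dict-building loop is the insert-fold over the valid entries
theorem pvA_out (rows : List (List (String × String)))
    (d : PySem.Dict String (List (String × String))) :
    rows.foldl (fun out row =>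
      let token := PySem.Str.strip (PySem.Dict.getD (PySem.Dict.ofList row) "object_id" "")
      if token ≠ "" then out.insert token (PySem.Dict.ofList row).items else out) d
    = (pvEntries rows).foldl (fun d p => d.insert p.1 p.2) d := by
  show rows.foldl (fun out row =>
      if pvTok row ≠ "" then out.insert (pvTok row) (pvItems row) else out) d = _
  induction rows generalizing d with
  | nil => rfl
  | cons r rs ih =>
    by_cases h : pvTok r ≠ ""
    · simp only [List.foldl_cons, pvEntries, List.filterMap_cons, if_pos h]
      exact ih _
    · simp only [List.foldl_cons, pvEntries, List.filterMap_cons, if_neg h]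
      exact ih _

-- B's loop is the insert-or-replace fold over the valid entries
theorem pvB_out (rows : List (List (String × String)))
    (acc : List (String × List (String × String))) :
    rows.foldl (fun res row =>
      let token := PySem.Str.strip (PySem.Dict.getD (PySem.Dict.ofList row) "object_id" "")
      if token ≠ "" then pvInsUpd token (PySem.Dict.ofList row).items res else res) acc
    = (pvEntries rows).foldl (fun res p => pvInsUpd p.1 p.2 res) acc := by
  show rows.foldl (fun res row =>
      if pvTok row ≠ "" then pvInsUpd (pvTok row) (pvItems row) res else res) acc = _
  induction rows generalizing acc with
  | nil => rfl
  | cons r rs ih =>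
    by_cases h : pvTok r ≠ ""
    · simp only [List.foldl_cons, pvEntries, List.filterMap_cons, if_pos h]
      exact ih _
    · simp only [List.foldl_cons, pvEntries, List.filterMap_cons, if_neg h]
      exact ih _

-- lookup in an insert-fold dict = last entry of the key class
theorem pvGetD_foldl_insert {ν : Type} (k : String) (d0 : ν)
    (M : List (String × ν)) (d : PySem.Dict String ν) :
    (M.foldl (fun d p => d.insert p.1 p.2) d).getD k d0
      = ((M.filter (fun p => decide (p.1 = k))).getLast?).elim (d.getD k d0) (fun p => p.2) := by
  induction M generalizing d with
  | nil => simp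
  | cons p M ih =>
    simp only [List.foldl_cons]
    rw [ih]
    have hsome : ∀ (q : String × ν) (qs : List (String × ν)), (q :: qs).getLast? ≠ none := by
      simp [List.getLast?_eq_none_iff]
    by_cases hk : p.1 = k
    · rw [List.filter_cons_of_pos (by simp [hk])]
      rcases hM : M.filter (fun p => decide (p.1 = k)) with _ | ⟨q, qs⟩
      · rw [hM]
        simp [hk]
      · rw [hM, List.getLast?_cons_cons]
        obtain ⟨a, ha⟩ := Option.ne_none_iff_exists'.mp (hsome q qs)
        rw [ha]
        rfl
    · rw [List.filter_cons_of_neg (by simp [hk])]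
      rcases hM : M.filter (fun p => decide (p.1 = k)) with _ | ⟨q, qs⟩
      · rw [hM]
        simp [PySem.Dict.getD_insert, Ne.symm hk]
      · rw [hM]
        obtain ⟨a, ha⟩ := Option.ne_none_iff_exists'.mp (hsome q qs)
        rw [ha]
        rfl

-- an element of the accumulator after insert-or-replace is the new pair or an old element
theorem pvInsUpd_mem (k : String) (v : List (String × String))
    (acc : List (String × List (String × String))) (a : String × List (String × String))
    (ha : a ∈ pvInsUpd k v acc) : a = (k, v) ∨ a ∈ acc := by
  induction acc with
  | nil => simpa [pvInsUpd] using ha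
  | cons p rest ih =>
    by_cases h1 : p.1 < k
    · rw [pvInsUpd, if_pos h1] at ha
      rcases List.mem_cons.mp ha with rfl | ha
      · exact Or.inr (List.mem_cons_self)
      · rcases ih ha with h | h
        · exact Or.inl h
        · exact Or.inr (List.mem_cons_of_mem _ h)
    · by_cases h2 : p.1 = k
      · rw [pvInsUpd, if_neg h1, if_pos h2] at ha
        rcases List.mem_cons.mp ha with rfl | ha
        · exact Or.inl rfl
        · exact Or.inr (List.mem_cons_of_mem _ ha)
      · rw [pvInsUpd, if_neg h1, if_neg h2] at ha
        rcases List.mem_cons.mp ha with rfl | ha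
        · exact Or.inl rfl
        · exact Or.inr ha

-- insert-or-replace keeps the list strictly key-sorted
theorem pvInsUpd_pairwise (k : String) (v : List (String × String))
    (acc : List (String × List (String × String)))
    (h : acc.Pairwise (fun a b => a.1 < b.1)) :
    (pvInsUpd k v acc).Pairwise (fun a b => a.1 < b.1) := by
  induction acc with
  | nil => simp [pvInsUpd]
  | cons p rest ih =>
    rw [List.pairwise_cons] at h
    by_cases h1 : p.1 < k
    · rw [pvInsUpd, if_pos h1]
      refine List.pairwise_cons.mpr ⟨?_, ih h.2⟩
      intro a ha
      rcases pvInsUpd_mem k v rest a ha with rfl | ha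
      · exact h1
      · exact h.1 a ha
    · by_cases h2 : p.1 = k
      · rw [pvInsUpd, if_neg h1, if_pos h2]
        refine List.pairwise_cons.mpr ⟨?_, h.2⟩
        intro a ha
        exact h2 ▸ h.1 a ha
      · have hk : k < p.1 := lt_of_le_of_ne (le_of_not_gt h1) (Ne.symm h2)
        rw [pvInsUpd, if_neg h1, if_neg h2]
        refine List.pairwise_cons.mpr ⟨?_, List.pairwise_cons.mpr h⟩
        intro a ha
        rcases List.mem_cons.mp ha with rfl | ha
        · exact hk
        · exact hk.trans (h.1 a ha)

-- after insert-or-replace, the key class of the new key is exactly the new pair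
theorem pvInsUpd_filter_self (k : String) (v : List (String × String))
    (acc : List (String × List (String × String)))
    (h : acc.Pairwise (fun a b => a.1 < b.1)) :
    (pvInsUpd k v acc).filter (fun p => decide (p.1 = k)) = [(k, v)] := by
  induction acc with
  | nil => simp [pvInsUpd]
  | cons p rest ih =>
    rw [List.pairwise_cons] at h
    by_cases h1 : p.1 < k
    · rw [pvInsUpd, if_pos h1, List.filter_cons_of_neg (by simp [ne_of_lt h1]), ih h.2]
    · by_cases h2 : p.1 = k
      · have hrest : rest.filter (fun q => decide (q.1 = k)) = [] := by
          rw [List.filter_eq_nil_iff]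
          intro a ha
          simp [ne_of_gt (h2 ▸ h.1 a ha)]
        rw [pvInsUpd, if_neg h1, if_pos h2, List.filter_cons_of_pos (by simp), hrest]
      · have hlt : k < p.1 := lt_of_le_of_ne (le_of_not_gt h1) (Ne.symm h2)
        have hall : (p :: rest).filter (fun q => decide (q.1 = k)) = [] := by
          rw [List.filter_eq_nil_iff]
          intro a ha
          rcases List.mem_cons.mp ha with rfl | ha
          · simp [ne_of_gt hlt]
          · simp [ne_of_gt (hlt.trans (h.1 a ha))]
        rw [pvInsUpd, if_neg h1, if_neg h2, List.filter_cons_of_pos (by simp), hall]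

-- insert-or-replace leaves every other key class unchanged
theorem pvInsUpd_filter_ne (k k' : String) (v : List (String × String))
    (acc : List (String × List (String × String))) (hk : k' ≠ k) :
    (pvInsUpd k v acc).filter (fun p => decide (p.1 = k'))
      = acc.filter (fun p => decide (p.1 = k')) := by
  induction acc with
  | nil => simp [pvInsUpd, Ne.symm hk]
  | cons p rest ih =>
    by_cases h1 : p.1 < k
    · by_cases hp : p.1 = k'
      · rw [pvInsUpd, if_pos h1, List.filter_cons_of_pos (by simp [hp]),
          List.filter_cons_of_pos (by simp [hp]), ih]
      · rw [pvInsUpd, if_pos h1, List.filter_cons_of_neg (by simp [hp]),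
          List.filter_cons_of_neg (by simp [hp]), ih]
    · by_cases h2 : p.1 = k
      · rw [pvInsUpd, if_neg h1, if_pos h2,
          List.filter_cons_of_neg (by simp [Ne.symm hk]),
          List.filter_cons_of_neg (by simp [h2, Ne.symm hk])]
      · rw [pvInsUpd, if_neg h1, if_neg h2,
          List.filter_cons_of_neg (by simp [Ne.symm hk])]

-- strict key-sortedness is preserved through the whole fold
theorem pvFoldIns_pairwise (L acc : List (String × List (String × String)))
    (h : acc.Pairwise (fun a b => a.1 < b.1)) :
    (L.foldl (fun res p => pvInsUpd p.1 p.2 res) acc).Pairwise (fun a b => a.1 < b.1) := by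
  induction L generalizing acc with
  | nil => exact h
  | cons p L ih => exact ih _ (pvInsUpd_pairwise _ _ _ h)

-- the key class of the fold's result = last matching entry of L (or the accumulator's class)
theorem pvFoldIns_filter (k : String) (L acc : List (String × List (String × String)))
    (h : acc.Pairwise (fun a b => a.1 < b.1)) :
    (L.foldl (fun res p => pvInsUpd p.1 p.2 res) acc).filter (fun p => decide (p.1 = k))
      = ((L.filter (fun p => decide (p.1 = k))).getLast?).elim
          (acc.filter (fun p => decide (p.1 = k))) (fun p => [p]) := by
  induction L generalizing acc with
  | nil => simp
  | cons p L ih =>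
    simp only [List.foldl_cons]
    rw [ih _ (pvInsUpd_pairwise _ _ _ h)]
    have hsome : ∀ (q : String × List (String × String)) qs, (q :: qs).getLast? ≠ none := by
      simp [List.getLast?_eq_none_iff]
    by_cases hk : p.1 = k
    · subst hk
      rw [List.filter_cons_of_pos (by simp), pvInsUpd_filter_self p.1 p.2 acc h]
      rcases hM : L.filter (fun q => decide (q.1 = p.1)) with _ | ⟨q, qs⟩
      · rw [hM]
        rfl
      · rw [hM, List.getLast?_cons_cons]
        obtain ⟨a, ha⟩ := Option.ne_none_iff_exists'.mp (hsome q qs)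
        rw [ha]
        rfl
    · rw [List.filter_cons_of_neg (by simp [hk]), pvInsUpd_filter_ne _ _ _ _ (fun e => hk e.symm)]

-- filtering a map over distinct keys picks at most the matching image
theorem pvFilter_map_keys (K : List String) (g : String → List (String × String)) (k : String)
    (hnd : K.Nodup) :
    ((K.map (fun k' => (k', g k'))).filter (fun p => decide (p.1 = k)))
      = if k ∈ K then [(k, g k)] else [] := by
  induction K with
  | nil => simp
  | cons a K ih =>
    rw [List.nodup_cons] at hnd
    simp only [List.map_cons]
    by_cases hk : a = k
    · subst hk
      rw [List.filter_cons_of_pos (by simp), ih hnd.2, if_neg (by simpa using hnd.1),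
        if_pos List.mem_cons_self]
    · rw [List.filter_cons_of_neg (by simp [hk]), ih hnd.2]
      by_cases hm : k ∈ K
      · rw [if_pos hm, if_pos (List.mem_cons_of_mem _ hm)]
      · rw [if_neg hm, if_neg (by simp [Ne.symm hk, hm])]

-- two strictly key-sorted lists with identical key classes are equal
theorem pvEq_of_filters (P Q : List (String × List (String × String)))
    (hP : P.Pairwise (fun a b => a.1 < b.1)) (hQ : Q.Pairwise (fun a b => a.1 < b.1))
    (h : ∀ k, P.filter (fun p => decide (p.1 = k)) = Q.filter (fun p => decide (p.1 = k))) :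
    P = Q := by
  have hmem : ∀ (R : List (String × List (String × String))) x,
      x ∈ R ↔ x ∈ R.filter (fun p => decide (p.1 = x.1)) := by
    intro R x
    rw [List.mem_filter]
    simp
  have hnd : ∀ (R : List (String × List (String × String))),
      R.Pairwise (fun a b => a.1 < b.1) → R.Nodup := by
    intro R hR
    exact hR.imp (fun hab => by rintro rfl; exact lt_irrefl _ hab)
  have hperm : P.Perm Q := by
    rw [List.perm_ext_iff_of_nodup (hnd P hP) (hnd Q hQ)]
    intro x
    rw [hmem P x, hmem Q x, h x.1]
  exact List.Perm.eq_of_pairwise (fun a b _ _ h1 h2 => absurd (h1.trans h2) (lt_irrefl _)) hP hQ hperm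

-- ===== VERDICT (by name: the statement is the Claim_ definition above) =====
theorem rows_by_object_id_py_spec : Claim_equal_rows_by_object_id_py := by
  intro rows _
  unfold Spec_rows_by_object_id_py rows_by_object_id_py rows_by_object_id_py_alt
  rw [pvA_out, pvB_out]
  dsimp only
  set L := pvEntries rows with hL
  set dL := L.foldl (fun d p => d.insert p.1 p.2) PySem.Dict.empty with hdL
  set B := L.foldl (fun res p => pvInsUpd p.1 p.2 res) [] with hB
  -- B is strictly key-sorted, so dict(result) round-trips to result itself
  have hBpw : B.Pairwise (fun a b => a.1 < b.1) := pvFoldIns_pairwise L [] (by simp)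
  have hBkeys : (B.map Prod.fst).Nodup :=
    (List.pairwise_map.mpr hBpw).imp (fun hab => ne_of_lt hab)
  have hBitems : (PySem.Dict.ofList B).items = B := by
    show (B.foldl (fun d p => d.insert p.1 p.2) PySem.Dict.empty).items = B
    rw [PySem.Dict.items_foldl_insert_fresh]
    · show PySem.Dict.empty.items ++ _ = _
      rw [show (PySem.Dict.empty : PySem.Dict String (List (String × String))).items = [] from rfl]
      simp
    · intro a _; exact PySem.Dict.contains_empty (ν := List (String × String)) a
    · exact hBkeys
  -- A's second pass re-emits dL over its sorted (distinct) keys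
  have hkL : dL.keys = PySem.Set.ofList (L.map Prod.fst) := by
    rw [hdL, PySem.Dict.keys_foldl_insert_key]
    simp [PySem.Set.update_nil_left]
  have hKpw : (PySem.List.sorted dL.keys (fun k => k) false).Pairwise (fun a b => a < b) := by
    rw [hkL]
    exact PySem.List.sorted_ofList_pairwise_lt _
  have hKnd : (PySem.List.sorted dL.keys (fun k => k) false).Nodup :=
    hKpw.imp (fun hab => ne_of_lt hab)
  have hfresh : ((PySem.List.sorted dL.keys (fun k => k) false).foldl
      (fun d k => d.insert k (dL.getD k [])) PySem.Dict.empty).items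
      = (PySem.List.sorted dL.keys (fun k => k) false).map (fun k => (k, dL.getD k [])) := by
    rw [PySem.Dict.items_foldl_insert_fresh]
    · show PySem.Dict.empty.items ++ _ = _
      rw [show (PySem.Dict.empty : PySem.Dict String (List (String × String))).items = [] from rfl]
      simp
    · intro a _; exact PySem.Dict.contains_empty (ν := List (String × String)) a
    · simpa using hKnd
  rw [hfresh, hBitems]
  -- both sides are strictly key-sorted with the same key classes
  apply pvEq_of_filters
  · exact List.pairwise_map.mpr hKpw
  · exact hBpw
  · intro k
    rw [pvFilter_map_keys _ _ _ hKnd,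
      pvFoldIns_filter k L [] (by simp), hdL, pvGetD_foldl_insert]
    have hmemK : k ∈ PySem.List.sorted dL.keys (fun k => k) false ↔ k ∈ L.map Prod.fst := by
      rw [PySem.List.mem_sorted, hkL, PySem.Set.mem_ofList]
    rcases hF : L.filter (fun p => decide (p.1 = k)) with _ | ⟨q, qs⟩
    · have hnot : k ∉ L.map Prod.fst := by
        intro hm
        obtain ⟨p, hp, hpk⟩ := List.mem_map.mp hm
        have := List.filter_eq_nil_iff.mp hF p hp
        simp [hpk] at this
      rw [hF, if_neg (fun hm => hnot (hmemK.mp hm))]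
      rfl
    · obtain ⟨r, hr⟩ : ∃ r, (q :: qs).getLast? = some r := by
        rcases hg : (q :: qs).getLast? with _ | r
        · simp [List.getLast?_eq_none_iff] at hg
        · exact ⟨r, rfl⟩
      have hrmem : r ∈ L.filter (fun p => decide (p.1 = k)) := by
        rw [hF]; exact List.mem_of_getLast? hr
      have hrk : r.1 = k := by
        have := List.of_mem_filter hrmem
        simpa using this
      have hrL : r ∈ L := List.mem_of_mem_filter hrmem
      rw [hF, hr, if_pos (hmemK.mpr (List.mem_map.mpr ⟨r, hrL, hrk⟩))]
      simp only [Option.elim]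
      rw [show ((k, r.2) : String × List (String × String)) = r from by rw [← hrk]]
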